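-- pv_equiv track=rewrite | github.com/daanishraj/cracking-the-coding-interview | Chapter1-arrays&strings/3_URLify/URLify.py | replaceSpaces1
-- ===== SOURCE A (Python) =====
-- def replaceSpaces1(input):
-- 	output = ""
-- 	for char in input:
-- 		if char == " ":
-- 			output += "%20"
-- 		else:
-- 			output += char
-- 	return output
-- ===== SOURCE B (Python) =====
-- def replaceSpaces1(input):
--     return "%20".join(input.split(" "))
-- ===== Notes on version B (the rewrite author's own statement) =====
-- stated objective: faster
-- what changed: Replaces A's character-by-character scan with repeated immutable-string concatenation by a single split-on-space then join-with-percent-20 two-pass formulation.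
import Mathlib
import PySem

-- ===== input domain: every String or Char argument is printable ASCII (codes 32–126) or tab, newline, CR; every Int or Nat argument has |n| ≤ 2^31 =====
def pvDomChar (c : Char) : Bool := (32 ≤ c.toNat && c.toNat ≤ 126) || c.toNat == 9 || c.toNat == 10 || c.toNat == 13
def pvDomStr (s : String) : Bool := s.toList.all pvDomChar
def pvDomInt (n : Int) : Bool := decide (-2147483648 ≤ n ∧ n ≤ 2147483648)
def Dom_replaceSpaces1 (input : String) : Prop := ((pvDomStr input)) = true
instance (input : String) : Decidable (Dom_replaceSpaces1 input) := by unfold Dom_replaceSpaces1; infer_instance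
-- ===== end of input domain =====

-- B replaces A's character-by-character scan-and-append with an idiomatic split-on-" " / join-with-"%20" formulation.

-- ===== PORT A =====
def replaceSpaces1 (input : String) : String :=
  String.ofList (input.toList.foldl
    (fun output char => if char == ' ' then output ++ "%20".toList else output ++ [char]) [])

-- ===== PORT B =====
-- input.split(" ") has a literal nonempty separator, so it is ported via Chars.splitOn
-- (exact: PySem.Str.split? input " " = some of exactly this list).
def replaceSpaces1_alt (input : String) : String :=
  PySem.Str.join "%20" ((PySem.Chars.splitOn input.toList [' ']).map String.ofList)

-- ===== PRECONDITION & SPEC =====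
def Spec_replaceSpaces1 (input : String) (out : String) : Prop := out = replaceSpaces1_alt input
instance (input : String) (out : String) : Decidable (Spec_replaceSpaces1 input out) := by unfold Spec_replaceSpaces1; infer_instance

-- ===== CLAIM (what is proved, stated in full; the proofs are below) =====
def Claim_equal_replaceSpaces1 : Prop := ∀ (input : String), Dom_replaceSpaces1 input → Spec_replaceSpaces1 input (replaceSpaces1 input)

-- ===== LEMMAS AND PROOFS =====

/-- The pieces `cs.split(" ")` produces, defined structurally. -/
def pvPieces : List Char → List (List Char)
  | [] => [[]]
  | c :: r =>
      if c = ' ' then [] :: pvPieces r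
      else match pvPieces r with
        | [] => [[c]]
        | h :: t => (c :: h) :: t

/-- Prepend onto the head piece. -/
def pvConsHead (x : List Char) : List (List Char) → List (List Char)
  | [] => [x]
  | h :: t => (x ++ h) :: t

theorem pvPieces_ne_nil (cs : List Char) : pvPieces cs ≠ [] := by
  cases cs with
  | nil => simp [pvPieces]
  | cons c r =>
      simp only [pvPieces]
      split
      · simp
      · cases h : pvPieces r <;> simp

def pvF (c : Char) : List Char := if c == ' ' then "%20".toList else [c]

theorem pv_go_spec (cs : List Char) : ∀ fuel, cs.length < fuel → ∀ cur acc,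
    PySem.Chars.splitOn.go [' '] fuel cs cur acc
      = acc.reverse ++ pvConsHead cur.reverse (pvPieces cs) := by
  induction cs with
  | nil =>
      intro fuel hf cur acc
      cases fuel with
      | zero => omega
      | succ f => simp [PySem.Chars.splitOn.go, pvPieces, pvConsHead]
  | cons c rest ih =>
      intro fuel hf cur acc
      cases fuel with
      | zero => omega
      | succ f =>
        have hrest : rest.length < f := by simpa using hf
        by_cases hc : c = ' '
        · subst hc
          rw [show PySem.Chars.splitOn.go [' '] (f+1) (' '::rest) cur acc
              = PySem.Chars.splitOn.go [' '] f rest [] (cur.reverse :: acc) by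
            simp [PySem.Chars.splitOn.go, List.isPrefixOf]]
          rw [ih f hrest [] (cur.reverse :: acc)]
          have hne := pvPieces_ne_nil rest
          cases h : pvPieces rest with
          | nil => exact absurd h hne
          | cons h0 t => simp [pvPieces, pvConsHead, h]
        · have hp : List.isPrefixOf [' '] (c::rest) = false := by
            simp only [List.isPrefixOf, Bool.and_true, beq_eq_false_iff_ne, ne_eq]
            exact fun h => hc h.symm
          rw [show PySem.Chars.splitOn.go [' '] (f+1) (c::rest) cur acc
              = PySem.Chars.splitOn.go [' '] f rest (c :: cur) acc by
            simp [PySem.Chars.splitOn.go, hp]]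
          rw [ih f hrest (c :: cur) acc]
          have hne := pvPieces_ne_nil rest
          cases h : pvPieces rest with
          | nil => exact absurd h hne
          | cons h0 t => simp [pvPieces, pvConsHead, h, hc]

theorem pv_splitOn_eq (cs : List Char) :
    PySem.Chars.splitOn cs [' '] = pvPieces cs := by
  have := pv_go_spec cs (cs.length + 1) (by omega) [] []
  rw [PySem.Chars.splitOn, this]
  have hne := pvPieces_ne_nil cs
  cases h : pvPieces cs with
  | nil => exact absurd h hne
  | cons h0 t => simp [pvConsHead]

theorem pv_intercalate_cons (sep h t) (c : Char) :
    List.intercalate sep ((c :: h) :: t) = c :: List.intercalate sep (h :: t) := by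
  cases t <;> simp [List.intercalate]

theorem pv_join_pieces (cs : List Char) :
    PySem.Chars.join "%20".toList (pvPieces cs) = cs.flatMap pvF := by
  induction cs with
  | nil => simp [pvPieces, PySem.Chars.join, List.intercalate]
  | cons c rest ih =>
      have hne := pvPieces_ne_nil rest
      by_cases hc : c = ' '
      · subst hc
        cases h : pvPieces rest with
        | nil => exact absurd h hne
        | cons h0 t =>
            rw [h] at ih
            simp only [PySem.Chars.join, List.intercalate] at ih
            simp [pvPieces, h, PySem.Chars.join, List.intercalate, pvF, ← ih]
      · cases h : pvPieces rest with
        | nil => exact absurd h hne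
        | cons h0 t =>
            rw [h] at ih
            simp only [pvPieces, if_neg hc, h, PySem.Chars.join] at *
            rw [pv_intercalate_cons, ih]
            simp [pvF, hc]

theorem pv_foldA (cs : List Char) : ∀ out : List Char,
    cs.foldl (fun output char => if char == ' ' then output ++ "%20".toList else output ++ [char]) out
      = out ++ cs.flatMap pvF := by
  induction cs with
  | nil => intro out; simp
  | cons c rest ih =>
      intro out
      rw [List.foldl_cons, ih]
      by_cases hc : c = ' ' <;> simp [pvF, hc]

-- ===== VERDICT (by name: the statement is the Claim_ definition above) =====
theorem replaceSpaces1_spec : Claim_equal_replaceSpaces1 := by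
  intro input _
  show replaceSpaces1 input = replaceSpaces1_alt input
  rw [replaceSpaces1, replaceSpaces1_alt, PySem.Str.join, pv_splitOn_eq, pv_foldA]
  rw [List.map_map, ← pv_join_pieces]
  congr 1
  simp [Function.comp_def]
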